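-- pv_equiv track=rewrite | github.com/JaneGovan/Training-Box | utils/formats.py | is_sharegpt_format
-- ===== SOURCE A (Python) =====
-- from typing import Dict, List, Tuple, Literal, Optional
--
-- def is_toolcall_format(sample: Dict):
--     if 'tools' in sample:
--         return True
--     else:
--         return False
--
-- def is_sharegpt_format(sample: Dict):
--     if is_toolcall_format(sample):
--         roles = ["system", "human", "gpt" , "function_call", "observation"]
--     else:
--         roles = ["system", "human", "gpt"]
--     if "conversations" in sample and isinstance(sample["conversations"], List) and len(sample["conversations"]) > 0:
--         before_role = ""
--         for idx, dialog in enumerate(sample["conversations"]):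
--             if "from" not in dialog or "value" not in dialog:
--                 return False
--             if idx != 0 and dialog.get("from") == "system":
--                 return False
--             if dialog.get("from") not in roles:
--                 return False
--             if idx != 0 and dialog.get("from") == "gpt" and before_role not in ("human", "observation"):
--                 return False
--             elif idx != 0 and dialog.get("from") == "function_call" and before_role != "human":
--                 return False
--             elif idx != 0 and dialog.get("from") == "observation" and before_role != "function_call":
--                 return False
--             elif idx != 0 and sample["conversations"][0].get("from") != "system" and dialog.get("from") == "human" and before_role != "gpt":
--                 return False
--             before_role = dialog.get("from")
--         return True
--     else:
--         return False
-- ===== SOURCE B (Python) =====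
-- def is_sharegpt_format(sample):
--     convs = sample.get("conversations")
--     if not isinstance(convs, list) or not convs:
--         return False
--     roles = {"system", "human", "gpt"}
--     if "tools" in sample:
--         roles |= {"function_call", "observation"}
--     seq = []
--     for d in convs:
--         if "from" not in d or "value" not in d:
--             return False
--         seq.append(d.get("from"))
--     if any(r not in roles for r in seq):
--         return False
--     if "system" in seq[1:]:
--         return False
--     allowed_prev = {"gpt": {"human", "observation"},
--                     "function_call": {"human"},
--                     "observation": {"function_call"}}
--     if seq[0] != "system":
--         allowed_prev["human"] = {"gpt"}
--     return all(r not in allowed_prev or p in allowed_prev[r]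
--                for p, r in zip(seq, seq[1:]))
-- ===== Notes on version B (the rewrite author's own statement) =====
-- stated objective: alternative
-- what changed: B replaces A's stateful if/elif cascade with maintained before_role by a pipeline: extract the role sequence once, then check role membership, no non-leading 'system', and adjacency of consecutive pairs (zip) against an allowed-predecessor table.
import Mathlib
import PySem

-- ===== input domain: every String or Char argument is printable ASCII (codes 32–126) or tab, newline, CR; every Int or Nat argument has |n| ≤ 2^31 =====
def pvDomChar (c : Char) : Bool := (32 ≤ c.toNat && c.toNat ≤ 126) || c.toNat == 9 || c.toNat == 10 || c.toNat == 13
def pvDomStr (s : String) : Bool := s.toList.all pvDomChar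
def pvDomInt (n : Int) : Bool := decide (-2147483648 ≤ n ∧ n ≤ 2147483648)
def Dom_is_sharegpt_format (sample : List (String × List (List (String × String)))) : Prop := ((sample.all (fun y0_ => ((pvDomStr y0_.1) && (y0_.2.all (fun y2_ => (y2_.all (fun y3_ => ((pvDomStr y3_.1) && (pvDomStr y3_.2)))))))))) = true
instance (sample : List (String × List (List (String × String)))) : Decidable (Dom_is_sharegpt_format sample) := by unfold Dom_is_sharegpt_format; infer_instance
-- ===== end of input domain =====

set_option maxHeartbeats 1000000

-- B replaces A's stateful before_role/if-elif cascade by: extract the role sequence once,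
-- then check role validity, no late "system", and adjacency on zipped consecutive pairs
-- against an allowed-predecessor table (objective: idiomatic/alternative, not faster).


-- ===== PORT A =====
-- dict.get / `k in d` on the association-list dicts (first match, per the type convention)
def pvDGet (d : List (String × String)) (k : String) : Option String :=
  (PySem.Dict.mk d).get? k

def pvDHas (d : List (String × String)) (k : String) : Bool :=
  (PySem.Dict.mk d).contains k

-- the for-loop of A; `convs` is sample["conversations"] (used for conversations[0]),
-- `idx`/`before_role` the enumerate index and the maintained previous role
def aLoop (roles : List String) (convs : List (List (String × String)))
    (ds : List (List (String × String))) (idx : Nat) (before_role : String) : Bool :=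
  match ds with
  | [] => true
  | d :: ds' =>
    if !(pvDHas d "from") || !(pvDHas d "value") then false
    else
      -- "from" is present here, so dialog.get("from") is this string
      let f := (pvDGet d "from").getD ""
      if idx != 0 && f == "system" then false
      else if !(roles.contains f) then false
      else if idx != 0 && f == "gpt" && !(before_role == "human" || before_role == "observation") then false
      else if idx != 0 && f == "function_call" && !(before_role == "human") then false
      else if idx != 0 && f == "observation" && !(before_role == "function_call") then false
      else if idx != 0 && !((pvDGet (convs.headD []) "from") == some "system") && f == "human" && !(before_role == "gpt") then false
      else aLoop roles convs ds' (idx + 1) f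

def is_toolcall_format (sample : List (String × List (List (String × String)))) : Bool :=
  if (PySem.Dict.mk sample).contains "tools" then true else false

def is_sharegpt_format (sample : List (String × List (List (String × String)))) : Bool :=
  let roles : List String :=
    if is_toolcall_format sample then ["system", "human", "gpt", "function_call", "observation"]
    else ["system", "human", "gpt"]
  match (PySem.Dict.mk sample).get? "conversations" with
  | some convs =>
    if convs.length > 0 then aLoop roles convs convs 0 ""
    else false
  | none => false

-- ===== PORT B =====
-- collect dialog.get("from") for every dialog; none if some dialog lacks "from" or "value"
def bSeq : List (List (String × String)) → Option (List String)
  | [] => some []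
  | d :: ds =>
    match (PySem.Dict.mk d).get? "from", (PySem.Dict.mk d).get? "value" with
    | some f, some _ => (bSeq ds).map (f :: ·)
    | _, _ => none

-- allowed-predecessor table (a dict in Source B)
def bTable (seq : List String) : PySem.Dict String (List String) :=
  let t := PySem.Dict.mk [("gpt", ["human", "observation"]), ("function_call", ["human"]),
    ("observation", ["function_call"])]
  if !(seq.headD "" == "system") then t.insert "human" ["gpt"] else t

def is_sharegpt_format_alt (sample : List (String × List (List (String × String)))) : Bool :=
  match (PySem.Dict.mk sample).get? "conversations" with
  | none => false
  | some convs =>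
    if convs.isEmpty then false
    else
      let roles : List String :=
        if (PySem.Dict.mk sample).contains "tools" then
          ["system", "human", "gpt", "function_call", "observation"]
        else ["system", "human", "gpt"]
      match bSeq convs with
      | none => false
      | some seq =>
        if seq.any (fun r => !(roles.contains r)) then false
        else if (seq.drop 1).contains "system" then false
        else
          (seq.zip (seq.drop 1)).all (fun pr =>
            match (bTable seq).get? pr.2 with
            | none => true
            | some ps => ps.contains pr.1)

-- ===== PRECONDITION & SPEC =====
def Spec_is_sharegpt_format (sample : List (String × List (List (String × String)))) (out : Bool) : Prop := out = is_sharegpt_format_alt sample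
instance (sample : List (String × List (List (String × String)))) (out : Bool) : Decidable (Spec_is_sharegpt_format sample out) := by unfold Spec_is_sharegpt_format; infer_instance

-- ===== CLAIM (what is proved, stated in full; the proofs are below) =====
def Claim_equal_is_sharegpt_format : Prop := ∀ (sample : List (String × List (List (String × String)))), Dom_is_sharegpt_format sample → Spec_is_sharegpt_format sample (is_sharegpt_format sample)

-- ===== LEMMAS AND PROOFS =====

-- the conjunction of A's three/four adjacency guards, as one predicate
def adjB (fns : Bool) (b f : String) : Bool :=
  !(f == "gpt" && !(b == "human" || b == "observation")) &&
  !(f == "function_call" && !(b == "human")) &&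
  !(f == "observation" && !(b == "function_call")) &&
  !(fns && f == "human" && !(b == "gpt"))

-- B's chained adjacency along the sequence
def chainB (fns : Bool) (b : String) : List String → Bool
  | [] => true
  | f :: rest => adjB fns b f && chainB fns f rest

theorem bcheck_eq_adjB (seq : List String) (b f : String) :
    (match (bTable seq).get? f with
     | none => true
     | some ps => ps.contains b) = adjB (!(seq.headD "" == "system")) b f := by
  have hs' : (seq.head?.getD "" == "system") = decide (seq.head?.getD "" = "system") := rfl
  by_cases hs : seq.head?.getD "" = "system" <;>
  (by_cases h1 : f = "gpt"
   · subst h1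
     simp [bTable, hs', hs, adjB, PySem.Dict.get?_insert, PySem.Dict.get?_mk_cons] <;> rfl
   by_cases h2 : f = "function_call"
   · subst h2
     simp [bTable, hs', hs, adjB, PySem.Dict.get?_insert, PySem.Dict.get?_mk_cons] <;> rfl
   by_cases h3 : f = "observation"
   · subst h3
     simp [bTable, hs', hs, adjB, PySem.Dict.get?_insert, PySem.Dict.get?_mk_cons] <;> rfl
   by_cases h4 : f = "human"
   · subst h4
     simp [bTable, hs', hs, adjB, PySem.Dict.get?_insert, PySem.Dict.get?_mk_cons] <;> rfl
   · have n1 : ("gpt" == f) = false := by simp [beq_iff_eq, Ne.symm h1]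
     have n2 : ("function_call" == f) = false := by simp [beq_iff_eq, Ne.symm h2]
     have n3 : ("observation" == f) = false := by simp [beq_iff_eq, Ne.symm h3]
     have n4 : ("human" == f) = false := by simp [beq_iff_eq, Ne.symm h4]
     simp [bTable, hs', hs, adjB, PySem.Dict.get?_insert, PySem.Dict.get?_mk_cons,
       PySem.Dict.get?, PySem.Dict.insert, PySem.Dict.contains, List.find?,
       n1, n2, n3, n4, h1, h2, h3, h4])

theorem zip_all_eq_chainB (seq : List String) (fns : Bool)
    (h : fns = !(seq.headD "" == "system")) :
    ∀ (l : List String) (b : String),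
      (((b :: l).zip l).all fun pr =>
        match (bTable seq).get? pr.2 with
        | none => true
        | some ps => ps.contains pr.1) = chainB fns b l := by
  intro l
  induction l with
  | nil => intro b; simp [chainB]
  | cons x l' ih =>
    intro b
    simp only [List.zip_cons_cons, List.all_cons, chainB, ih]
    have := bcheck_eq_adjB seq b x
    rw [← h] at this
    simp only [this]

theorem aLoop_tail (roles : List String) (convs : List (List (String × String))) (fns : Bool)
    (hfns : fns = !(pvDGet (convs.headD []) "from" == some "system")) :
    ∀ (ds : List (List (String × String))) (idx : Nat) (b : String), idx ≠ 0 →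
      aLoop roles convs ds idx b =
        (match bSeq ds with
         | none => false
         | some seq =>
             seq.all (fun r => roles.contains r && !(r == "system")) && chainB fns b seq) := by
  intro ds
  induction ds with
  | nil => intro idx b _; simp [aLoop, bSeq, chainB]
  | cons d ds' ih =>
    intro idx b hidx
    have hne : (idx == 0) = false := by simpa using hidx
    cases hf : (PySem.Dict.mk d).get? "from" with
    | none =>
      have hc : pvDHas d "from" = false := by
        rw [pvDHas, PySem.Dict.contains_eq_isSome_get?, hf]; rfl
      simp [aLoop, bSeq, hc, hf]
    | some f =>
      have hcf : pvDHas d "from" = true := by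
        rw [pvDHas, PySem.Dict.contains_eq_isSome_get?, hf]; rfl
      cases hv : (PySem.Dict.mk d).get? "value" with
      | none =>
        have hcv : pvDHas d "value" = false := by
          rw [pvDHas, PySem.Dict.contains_eq_isSome_get?, hv]; rfl
        simp [aLoop, bSeq, hcf, hcv, hf, hv]
      | some v =>
        have hcv : pvDHas d "value" = true := by
          rw [pvDHas, PySem.Dict.contains_eq_isSome_get?, hv]; rfl
        have hrec := ih (idx + 1) f (by omega)
        simp only [aLoop, bSeq, hcf, hcv, hf, hv, pvDGet, Option.getD_some, hne,
          Bool.not_true, Bool.not_false, Bool.false_and, Bool.true_and, if_false,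
          Bool.or_false, Bool.false_or, ite_false, hrec, ← hfns]
        cases hseq : bSeq ds' with
        | none =>
          simp only [Option.map_none]
          split_ifs <;> rfl
        | some seq =>
          simp only [Option.map_some, chainB, adjB, List.all_cons]
          split_ifs with g1 g2 g3 g4 g5 g6
          all_goals simp_all [pvDGet]
          (try clear ih); (try clear hrec); (try clear hidx); (try clear hne)
          (try clear hf); (try clear hv); (try clear hcf); (try clear hcv); (try clear hseq)
          have sb : ∀ x y : String, (x == y) = decide (x = y) := fun _ _ => rfl
          by_cases p1 : f = "gpt" <;> by_cases p2 : f = "function_call" <;>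
            by_cases p3 : f = "observation" <;> by_cases p4 : f = "human" <;>
            by_cases qhd : (PySem.Dict.mk (convs.head?.getD [])).get? "from" = some "system" <;>
            by_cases qb1 : b = "human" <;> by_cases qb2 : b = "observation" <;>
            simp_all [pvDGet, sb]

-- ===== VERDICT (by name: the statement is the Claim_ definition above) =====
theorem is_sharegpt_format_spec : Claim_equal_is_sharegpt_format := by
  intro sample _
  show is_sharegpt_format sample = is_sharegpt_format_alt sample
  cases hc : (PySem.Dict.mk sample).get? "conversations" with
  | none => simp [is_sharegpt_format, is_sharegpt_format_alt, hc]
  | some convs =>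
    cases convs with
    | nil => simp [is_sharegpt_format, is_sharegpt_format_alt, hc]
    | cons d rest =>
      cases hfrom : (PySem.Dict.mk d).get? "from" with
      | none =>
        have hcf : pvDHas d "from" = false := by
          rw [pvDHas, PySem.Dict.contains_eq_isSome_get?, hfrom]; rfl
        simp [is_sharegpt_format, is_sharegpt_format_alt, hc,
          aLoop, bSeq, hcf, hfrom]
      | some f =>
        have hcf : pvDHas d "from" = true := by
          rw [pvDHas, PySem.Dict.contains_eq_isSome_get?, hfrom]; rfl
        cases hval : (PySem.Dict.mk d).get? "value" with
        | none =>
          have hcv : pvDHas d "value" = false := by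
            rw [pvDHas, PySem.Dict.contains_eq_isSome_get?, hval]; rfl
          simp [is_sharegpt_format, is_sharegpt_format_alt, hc,
            aLoop, bSeq, hcf, hcv, hfrom, hval]
        | some v =>
          have hcv : pvDHas d "value" = true := by
            rw [pvDHas, PySem.Dict.contains_eq_isSome_get?, hval]; rfl
          have htail := aLoop_tail
            (if (PySem.Dict.mk sample).contains "tools" then
              ["system", "human", "gpt", "function_call", "observation"]
             else ["system", "human", "gpt"])
            (d :: rest) (!(pvDGet ((d :: rest).headD []) "from" == some "system")) rfl
            rest 1 f (by omega)
          cases htools : sample.any (fun p => p.1 == "tools") <;>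
            simp only [PySem.Dict.contains_mk, htools, if_true, if_false,
              Bool.false_eq_true] at htail <;>
          cases hs : bSeq rest with
          | none =>
            simp [is_sharegpt_format, is_sharegpt_format_alt, is_toolcall_format, hc,
              aLoop, bSeq, hcf, hcv, hfrom, hval, hs, htail, htools, pvDGet]
          | some sq =>
            have hzip := zip_all_eq_chainB (f :: sq) (!(f == "system")) (by simp) sq f
            simp [is_sharegpt_format, is_sharegpt_format_alt, is_toolcall_format, hc,
              aLoop, bSeq, hcf, hcv, hfrom, hval, hs, htail, pvDGet, htools]
            rw [Bool.eq_iff_iff]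
            constructor <;> intro h <;> simp_all <;>
              first
                | (obtain ⟨-, h2, -⟩ := h
                   exact ⟨fun x hx => by rcases h2 x hx with ⟨hr, hns⟩; intros; tauto,
                          fun hsys => absurd rfl (h2 _ hsys).2⟩)
                | (obtain ⟨⟨-, h2⟩, hns, -⟩ := h
                   intro x hx
                   have hxs : ¬ x = "system" := fun hxe => hns (hxe ▸ hx)
                   exact ⟨by have h3 := h2 x hx hxs; tauto, hxs⟩)
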